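-- pv_equiv track=rewrite | github.com/unknown009d/Weebeio | ServerSide/chat.py | findNameKeyword
-- ===== SOURCE A (Python) =====
-- def findNameKeyword(set_botName, userMessage, cleanMsg):
--     breakCleanMsg = cleanMsg.split(" ")
--     matchCaseforName = 0
--     for data in set_botName:
--         for inD in breakCleanMsg:
--             if inD == data:
--                 matchCaseforName += 1
--
--     matchCaseforSMname = 0
--     for data in breakCleanMsg:
--         for inD in ["your", "name", "ur"]:
--             if inD == data:
--                 matchCaseforSMname += 1
--
--     if userMessage[-1:] == "?":
--         matchCaseforSMname += 1
--
--     if (matchCaseforName >= 3 or matchCaseforSMname >= 3):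
--         return True
--     else:
--         return False
-- ===== SOURCE B (Python) =====
-- def findNameKeyword(set_botName, userMessage, cleanMsg):
--     # Sort-then-merge: sort the message words and the bot-name vocabulary once,
--     # then count matches with one linear two-pointer sweep instead of nested scans.
--     words = sorted(cleanMsg.split(" "))
--     nameHits = 0
--     i = 0
--     for b in sorted(set_botName):
--         while i < len(words) and words[i] < b:
--             i += 1
--         j = i
--         while j < len(words) and words[j] == b:
--             j += 1
--         nameHits += j - i
--     smHits = 0
--     for w in words:
--         if w in ("your", "name", "ur"):
--             smHits += 1
--     if userMessage[-1:] == "?":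
--         smHits += 1
--     return nameHits >= 3 or smHits >= 3
-- ===== Notes on version B (the rewrite author's own statement) =====
-- stated objective: alternative
-- what changed: Replaces A's nested vocabulary-by-words scans with a sort-then-merge algorithm: both the message words and the bot-name list are sorted once and matches are counted by a single two-pointer sweep over runs of equal strings.
import Mathlib
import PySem

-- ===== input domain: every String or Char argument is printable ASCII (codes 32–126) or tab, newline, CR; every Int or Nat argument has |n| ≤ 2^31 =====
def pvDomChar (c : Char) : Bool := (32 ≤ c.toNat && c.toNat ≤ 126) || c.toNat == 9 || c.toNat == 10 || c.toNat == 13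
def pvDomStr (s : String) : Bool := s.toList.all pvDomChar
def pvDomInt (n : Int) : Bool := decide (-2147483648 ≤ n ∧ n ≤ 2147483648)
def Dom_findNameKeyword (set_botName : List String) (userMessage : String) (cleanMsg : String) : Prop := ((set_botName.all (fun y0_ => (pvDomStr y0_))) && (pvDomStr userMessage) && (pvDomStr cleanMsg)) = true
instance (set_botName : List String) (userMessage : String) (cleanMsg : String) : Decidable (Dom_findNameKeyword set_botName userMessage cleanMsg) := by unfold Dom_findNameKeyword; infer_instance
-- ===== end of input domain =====

-- B replaces A's nested scans by sorting the words and the bot names once and counting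
-- matches with a single two-pointer merge sweep; objective: alternative.

-- ===== PORT A =====
def findNameKeyword (set_botName : List String) (userMessage : String) (cleanMsg : String) : Bool :=
  let breakCleanMsg := (PySem.Str.split? cleanMsg " ").getD []   -- sep " " ≠ "", so split? is some
  let matchCaseforName : Int := set_botName.foldl
    (fun acc data => breakCleanMsg.foldl (fun a inD => if inD == data then a + 1 else a) acc) 0
  let matchCaseforSMname : Int := breakCleanMsg.foldl
    (fun acc data => (["your", "name", "ur"] : List String).foldl
      (fun a inD => if inD == data then a + 1 else a) acc) 0
  let matchCaseforSMname :=
    if PySem.Str.slice userMessage (some (-1)) none == "?" then matchCaseforSMname + 1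
    else matchCaseforSMname
  if matchCaseforName ≥ 3 ∨ matchCaseforSMname ≥ 3 then true else false

-- ===== PORT B =====
-- 'while i < len(words) and words[i] < b: i += 1'
def pvSkipLt (ws : List String) (b : String) (i : Nat) : Nat :=
  if h : i < ws.length then
    (if ws[i] < b then pvSkipLt ws b (i + 1) else i)
  else i
termination_by ws.length - i

-- 'while j < len(words) and words[j] == b: j += 1'
def pvRunEq (ws : List String) (b : String) (j : Nat) : Nat :=
  if h : j < ws.length then
    (if ws[j] == b then pvRunEq ws b (j + 1) else j)
  else j
termination_by ws.length - j

def findNameKeyword_alt (set_botName : List String) (userMessage : String) (cleanMsg : String) : Bool :=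
  let words := PySem.List.sorted ((PySem.Str.split? cleanMsg " ").getD []) (fun x => x) false
  let st := (PySem.List.sorted set_botName (fun x => x) false).foldl
    (fun (p : Int × Nat) b =>
      let i := pvSkipLt words b p.2
      let j := pvRunEq words b i
      (p.1 + ((j - i : Nat) : Int), i))
    ((0 : Int), (0 : Nat))
  let nameHits := st.1
  let smHits : Int := words.foldl
    (fun a w => if w ∈ (["your", "name", "ur"] : List String) then a + 1 else a) 0
  let smHits := if PySem.Str.slice userMessage (some (-1)) none == "?" then smHits + 1 else smHits
  decide (nameHits ≥ 3) || decide (smHits ≥ 3)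

-- ===== PRECONDITION & SPEC =====
def Spec_findNameKeyword (set_botName : List String) (userMessage : String) (cleanMsg : String) (out : Bool) : Prop := out = findNameKeyword_alt set_botName userMessage cleanMsg
instance (set_botName : List String) (userMessage : String) (cleanMsg : String) (out : Bool) : Decidable (Spec_findNameKeyword set_botName userMessage cleanMsg out) := by unfold Spec_findNameKeyword; infer_instance

-- ===== CLAIM (what is proved, stated in full; the proofs are below) =====
def Claim_equal_findNameKeyword : Prop := ∀ (set_botName : List String) (userMessage : String) (cleanMsg : String), Dom_findNameKeyword set_botName userMessage cleanMsg → Spec_findNameKeyword set_botName userMessage cleanMsg (findNameKeyword set_botName userMessage cleanMsg)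

-- ===== LEMMAS AND PROOFS =====

-- A's bot-name double loop equals the sum of per-word counts.
theorem nameLoop_eq (bs ws : List String) (a : Int) :
    bs.foldl (fun acc data => ws.foldl (fun x inD => if inD == data then x + 1 else x) acc) a
      = a + (bs.map (fun w => (ws.count w : Int))).sum := by
  induction bs generalizing a with
  | nil => simp
  | cons b bs ih =>
      rw [List.foldl_cons, PySem.List.foldl_beq_add_one, ih]
      simp
      ring

-- B's membership loop equals the same three word counts.
theorem smAltLoop_eq (ws : List String) (a : Int) :
    ws.foldl (fun a w => if w ∈ (["your", "name", "ur"] : List String) then a + 1 else a) a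
      = a + (ws.count "your" : Int) + (ws.count "name" : Int) + (ws.count "ur" : Int) := by
  induction ws generalizing a with
  | nil => simp
  | cons w ws ih =>
      rw [List.foldl_cons, ih]
      simp only [List.count_cons]
      by_cases h1 : "your" = w <;> by_cases h2 : "name" = w <;> by_cases h3 : "ur" = w <;>
        first
          | (subst h1; simp_all; try ring)
          | (subst h2; simp_all; try ring)
          | (subst h3; simp_all; try ring)
          | simp [h1, h2, h3, Ne.symm h1, Ne.symm h2, Ne.symm h3]

theorem drop_len_takeWhile (p : String → Bool) (l : List String) :
    l.drop (l.takeWhile p).length = l.dropWhile p := by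
  induction l with
  | nil => rfl
  | cons x t ih =>
      by_cases h : p x
      · rw [List.takeWhile_cons_of_pos h, List.dropWhile_cons_of_pos h]; simpa using ih
      · rw [List.takeWhile_cons_of_neg h, List.dropWhile_cons_of_neg h]; rfl

theorem take_len_takeWhile (p : String → Bool) (l : List String) :
    l.take (l.takeWhile p).length = l.takeWhile p :=
  (List.prefix_iff_eq_take.mp (List.takeWhile_prefix p)).symm

theorem pvSkipLt_eq (ws : List String) (b : String) (i : Nat) :
    pvSkipLt ws b i = i + ((ws.drop i).takeWhile (fun w => decide (w < b))).length := by
  fun_induction pvSkipLt ws b i with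
  | case1 i h hlt ih =>
      rw [List.drop_eq_getElem_cons h, List.takeWhile_cons_of_pos (by simpa using hlt), ih]
      simp; omega
  | case2 i h hlt =>
      rw [List.drop_eq_getElem_cons h, List.takeWhile_cons_of_neg (by simpa using hlt)]
      simp
  | case3 i h =>
      rw [List.drop_eq_nil_of_le (by omega)]
      simp

theorem pvRunEq_eq (ws : List String) (b : String) (j : Nat) :
    pvRunEq ws b j = j + ((ws.drop j).takeWhile (fun w => w == b)).length := by
  fun_induction pvRunEq ws b j with
  | case1 j h heq ih =>
      rw [List.drop_eq_getElem_cons h, List.takeWhile_cons_of_pos (by simpa using heq), ih]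
      simp; omega
  | case2 j h heq =>
      rw [List.drop_eq_getElem_cons h, List.takeWhile_cons_of_neg (by simpa using heq)]
      simp
  | case3 j h =>
      rw [List.drop_eq_nil_of_le (by omega)]
      simp

theorem count_sorted_eq_run (l : List String) (hl : l.Pairwise (· ≤ ·)) (b : String) :
    l.count b = ((l.dropWhile (fun w => decide (w < b))).takeWhile (fun w => w == b)).length := by
  induction l with
  | nil => rfl
  | cons x t ih =>
      have hx : ∀ y ∈ t, x ≤ y := fun y hy => List.rel_of_pairwise_cons hl hy
      have ht := hl.of_cons
      by_cases hxb : x < b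
      · rw [List.dropWhile_cons_of_pos (by simpa using hxb),
          List.count_cons_of_ne (by exact fun h => absurd h (ne_of_lt hxb) : x ≠ b)]
        exact ih ht
      · have hbx : b ≤ x := not_lt.mp hxb
        rw [List.dropWhile_cons_of_neg (by simpa using hxb)]
        by_cases hxeq : x = b
        · subst hxeq
          rw [List.takeWhile_cons_of_pos (by simp), List.count_cons_self]
          have hdt : t.dropWhile (fun w => decide (w < x)) = t := by
            cases t with
            | nil => rfl
            | cons y ts =>
                exact List.dropWhile_cons_of_neg (by simpa using not_lt.mpr (hx y (by simp)))
          rw [ih ht, hdt, List.length_cons]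
        · have hblt : b < x := lt_of_le_of_ne hbx (Ne.symm hxeq)
          rw [List.takeWhile_cons_of_neg (by simpa using hxeq)]
          simp only [List.length_nil]
          rw [List.count_cons_of_ne hxeq]
          exact List.count_eq_zero.mpr (fun hm => absurd (hx b hm) (not_le.mpr hblt))

theorem mergeFold_eq (ws : List String) (hws : ws.Pairwise (· ≤ ·)) :
    ∀ (ns : List String), ns.Pairwise (· ≤ ·) → ∀ (acc : Int) (i : Nat),
    (∀ w ∈ ws.take i, ∀ b ∈ ns, w < b) →
    (ns.foldl (fun (p : Int × Nat) b =>
        let i' := pvSkipLt ws b p.2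
        let j := pvRunEq ws b i'
        (p.1 + ((j - i' : Nat) : Int), i')) (acc, i)).1
      = acc + (ns.map (fun b => (ws.count b : Int))).sum := by
  intro ns
  induction ns with
  | nil => intro _ acc i _; simp
  | cons b ns ih =>
      intro hns acc i hinv
      have hdrop : (ws.drop i).Pairwise (· ≤ ·) := hws.sublist (List.drop_sublist ..)
      have ht1 := pvSkipLt_eq ws b i
      have ht2 := pvRunEq_eq ws b (pvSkipLt ws b i)
      set t1 := ((ws.drop i).takeWhile (fun w => decide (w < b))).length with ht1def
      set t2 := ((ws.drop (pvSkipLt ws b i)).takeWhile (fun w => w == b)).length with ht2def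
      have hdd : ws.drop (pvSkipLt ws b i) = (ws.drop i).dropWhile (fun w => decide (w < b)) := by
        rw [ht1, ← List.drop_drop, ht1def, drop_len_takeWhile]
      have hcnt : t2 = ws.count b := by
        have h0 : (ws.take i).count b = 0 :=
          List.count_eq_zero.mpr (fun hm => absurd (hinv b hm b (List.mem_cons_self)) (lt_irrefl b))
        have : ws.count b = (ws.take i).count b + (ws.drop i).count b := by
          rw [← List.count_append, List.take_append_drop]
        rw [this, h0, Nat.zero_add, count_sorted_eq_run _ hdrop, ht2def, hdd]
      have hinv' : ∀ w ∈ ws.take (pvSkipLt ws b i), ∀ b' ∈ ns, w < b' := by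
        intro w hw b' hb'
        have hbb' : b ≤ b' := List.rel_of_pairwise_cons hns hb'
        rw [ht1, List.take_add, ht1def, take_len_takeWhile] at hw
        rcases List.mem_append.mp hw with h | h
        · exact hinv w h b' (List.mem_cons_of_mem _ hb')
        · exact lt_of_lt_of_le (by simpa using List.mem_takeWhile_imp h) hbb'
      rw [List.foldl_cons]
      simp only
      rw [ht2, Nat.add_sub_cancel_left]
      rw [ih hns.of_cons _ _ hinv', hcnt]
      simp
      ring

-- ===== VERDICT (by name: the statement is the Claim_ definition above) =====
theorem cast_count_eq_sum (x : String) (t : List String) :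
    (List.map (fun i => if x = i then (1 : Int) else 0) t).sum = (t.count x : Int) := by
  induction t with
  | nil => simp
  | cons y ts ih =>
      simp only [List.map_cons, List.sum_cons, List.count_cons, ih]
      by_cases h : x = y
      · simp [h]; omega
      · simp [h]; exact fun hh => h hh.symm

theorem sumTriple_eq (l : List String) :
    (l.map (fun w => (List.count w (["your", "name", "ur"] : List String) : Int))).sum
      = (l.count "your" : Int) + l.count "name" + l.count "ur" := by
  induction l with
  | nil => simp
  | cons w t ih =>
      have hc : (List.count w (["your", "name", "ur"] : List String) : Int)
          = (if ("your" : String) = w then 1 else 0) + (if ("name" : String) = w then 1 else 0)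
            + (if ("ur" : String) = w then 1 else 0) := by
        by_cases h1 : ("your" : String) = w
        · subst h1; decide
        · by_cases h2 : ("name" : String) = w
          · subst h2; decide
          · by_cases h3 : ("ur" : String) = w
            · subst h3; decide
            · simp [List.count_cons, Ne.symm h1, Ne.symm h2, Ne.symm h3, h1, h2, h3]
      simp only [List.map_cons, List.sum_cons, ih, List.count_cons, hc]
      push_cast
      push_cast
      by_cases h1 : ("your" : String) = w
      · have h2 : ¬ ("name" : String) = w := fun h => absurd (h1.trans h.symm) (by decide)
        have h3 : ¬ ("ur" : String) = w := fun h => absurd (h1.trans h.symm) (by decide)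
        simp [h1, h2, h3, Ne.symm h2, Ne.symm h3, beq_iff_eq, cast_count_eq_sum]; ring
      · by_cases h2 : ("name" : String) = w
        · have h3 : ¬ ("ur" : String) = w := fun h => absurd (h2.trans h.symm) (by decide)
          simp [h1, h2, h3, Ne.symm h1, Ne.symm h3, beq_iff_eq, cast_count_eq_sum]; ring
        · by_cases h3 : ("ur" : String) = w
          · simp [h1, h2, h3, Ne.symm h1, Ne.symm h2, beq_iff_eq, cast_count_eq_sum]
            try ring
          · simp [h1, h2, h3, Ne.symm h1, Ne.symm h2, Ne.symm h3, beq_iff_eq, cast_count_eq_sum]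
            try ring

theorem findNameKeyword_spec : Claim_equal_findNameKeyword := by
  intro sb um cm _
  unfold Spec_findNameKeyword findNameKeyword findNameKeyword_alt
  set ws := (PySem.Str.split? cm " ").getD [] with hws
  set ws' := PySem.List.sorted ws (fun x => x) false with hws'
  set ns' := PySem.List.sorted sb (fun x => x) false with hns'
  have hperm : ws'.Perm ws := PySem.List.sorted_perm ..
  have hpermn : ns'.Perm sb := PySem.List.sorted_perm ..
  have hwsP : ws'.Pairwise (· ≤ ·) := by
    simpa using PySem.List.sorted_pairwise (xs := ws) (key := fun x => x)
  have hnsP : ns'.Pairwise (· ≤ ·) := by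
    simpa using PySem.List.sorted_pairwise (xs := sb) (key := fun x => x)
  have hmerge := mergeFold_eq ws' hwsP ns' hnsP 0 0 (by simp)
  have hE1 : (ns'.map (fun b => (ws'.count b : Int))).sum
      = (sb.map (fun w => (ws.count w : Int))).sum := by
    have hfuns : (fun b => (ws'.count b : Int)) = (fun b => (ws.count b : Int)) :=
      funext fun b => by rw [hperm.count_eq]
    rw [hfuns, (hpermn.map _).sum_eq]
  have hE1b : (ns'.map (fun b => (ws.count b : Int))).sum
      = (sb.map (fun w => (ws.count w : Int))).sum := (hpermn.map _).sum_eq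
  simp only [nameLoop_eq, smAltLoop_eq, hmerge, hE1b, hperm.count_eq, sumTriple_eq]
  by_cases hq : (PySem.Str.slice um (some (-1)) == "?") = true <;>
    simp only [hq, if_true, if_false, Bool.false_eq_true] <;>
      (by_cases h1 : (0 : Int) + (sb.map (fun w => (ws.count w : Int))).sum ≥ 3 <;>
        split_ifs <;> simp_all <;> omega)
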